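-- pv_equiv track=rewrite | github.com/kulraghav/CodePractice | practice.py | get_slides
-- ===== SOURCE A (Python) =====
-- def get_slides(arr):
--     up_slides = []
--     down_slides = []
--     """
--         up_slides[i] = longest up-slide ending in i
--         down_slides[i] = longest down-slide starting at i
--     """
--     for i in range(len(arr)):
--         up_slides.append(1)
--         down_slides.append(1)
--
--     for i in range(1, len(arr)):
--         if arr[i] > arr[i-1]:
--             up_slides[i] = up_slides[i-1] + 1
--         else:
--             up_slides[i] = 1
--
--     for i in range(len(arr)-2, -1, -1):
--         if arr[i] > arr[i+1]:
--             down_slides[i] = down_slides[i+1] + 1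
--         else:
--             down_slides[i] = 1
--
--
--     return up_slides, down_slides
-- ===== SOURCE B (Python) =====
-- def _run_lengths(a, up):
--     """Lengths of the maximal strictly monotone (increasing if up, else
--     decreasing) runs of a, left to right."""
--     lens = []
--     i = 0
--     n = len(a)
--     while i < n:
--         j = i + 1
--         while j < n and (a[j] > a[j - 1] if up else a[j] < a[j - 1]):
--             j += 1
--         lens.append(j - i)
--         i = j
--     return lens
--
-- def get_slides(arr):
--     up_slides = [k for L in _run_lengths(arr, True) for k in range(1, L + 1)]
--     down_slides = [k for L in _run_lengths(arr, False) for k in range(L, 0, -1)]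
--     return up_slides, down_slides
-- ===== Notes on version B (the rewrite author's own statement) =====
-- stated objective: alternative
-- what changed: Instead of per-element recurrences (A writes each cell from its neighbour in three index loops), B first segments the array into maximal strictly monotone runs and then emits a whole arithmetic range (1..L ascending, L..1 descending) per run.
import Mathlib
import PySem

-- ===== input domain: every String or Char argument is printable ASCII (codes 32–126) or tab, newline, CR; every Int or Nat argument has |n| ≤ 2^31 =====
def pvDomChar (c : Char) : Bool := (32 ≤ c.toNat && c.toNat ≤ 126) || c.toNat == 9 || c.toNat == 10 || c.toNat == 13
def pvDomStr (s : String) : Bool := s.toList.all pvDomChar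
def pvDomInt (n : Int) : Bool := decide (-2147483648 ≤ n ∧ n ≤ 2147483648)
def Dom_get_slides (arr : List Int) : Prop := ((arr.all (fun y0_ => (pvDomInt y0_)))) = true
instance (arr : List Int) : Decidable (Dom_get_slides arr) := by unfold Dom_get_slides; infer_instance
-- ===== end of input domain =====

-- B replaces A's per-element recurrence loops by run segmentation: it cuts the array into
-- maximal strictly monotone runs and emits one arithmetic range per run (alternative shape).

-- ===== PORT A =====
-- literal port of A: init loop appending 1s, forward loop writing up[i], backward loop writing down[i]
def get_slides (arr : List Int) : List Int × List Int :=
  let n : Int := (arr.length : Int)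
  let init := (PySem.List.pyRange 0 n 1).foldl
      (fun (st : List Int × List Int) _ => (st.1 ++ [1], st.2 ++ [1])) ([], [])
  let up := (PySem.List.pyRange 1 n 1).foldl
      (fun u i =>
        if PySem.List.pyGetD arr i 0 > PySem.List.pyGetD arr (i-1) 0 then
          u.set i.toNat (PySem.List.pyGetD u (i-1) 0 + 1)
        else
          u.set i.toNat 1) init.1
  let down := (PySem.List.pyRange (n-2) (-1) (-1)).foldl
      (fun d i =>
        if PySem.List.pyGetD arr i 0 > PySem.List.pyGetD arr (i+1) 0 then
          d.set i.toNat (PySem.List.pyGetD d (i+1) 0 + 1)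
        else
          d.set i.toNat 1) init.2
  (up, down)

-- ===== PORT B =====
-- inner while loop of _run_lengths: how far the strictly monotone run continues past prev `p`,
-- and the remaining suffix where it stops
def takeRun (up : Bool) (p : Int) : List Int → Nat × List Int
  | [] => (0, [])
  | x :: xs =>
    if (if up then p < x else x < p) then
      ((takeRun up x xs).1 + 1, (takeRun up x xs).2)
    else (0, x :: xs)

-- termination measure for runLengths (cited by its decreasing_by)
theorem takeRun_snd_length (up : Bool) (p : Int) (xs : List Int) :
    (takeRun up p xs).2.length ≤ xs.length := by
  induction xs generalizing p with
  | nil => simp [takeRun]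
  | cons x xs ih =>
    by_cases hc : (if up = true then p < x else x < p)
    · simp only [takeRun, if_pos hc]
      exact le_trans (ih x) (by simp)
    · simp [takeRun, if_neg hc]

-- outer while loop of _run_lengths: lengths of the maximal monotone runs, left to right
def runLengths (up : Bool) : List Int → List Nat
  | [] => []
  | x :: xs => ((takeRun up x xs).1 + 1) :: runLengths up (takeRun up x xs).2
termination_by l => l.length
decreasing_by
  simp only [List.length_cons]
  exact Nat.lt_succ_of_le (takeRun_snd_length _ _ _)

-- the two comprehensions: range(1, L+1) ascending per up-run, range(L, 0, -1) descending per down-run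
def get_slides_alt (arr : List Int) : List Int × List Int :=
  ((runLengths true arr).flatMap (fun L => (List.range L).map (fun (i : Nat) => (i : Int) + 1)),
   (runLengths false arr).flatMap (fun L => (List.range L).map (fun (i : Nat) => (L : Int) - (i : Int))))

-- ===== PRECONDITION & SPEC =====
def Spec_get_slides (arr : List Int) (out : List Int × List Int) : Prop := out = get_slides_alt arr
instance (arr : List Int) (out : List Int × List Int) : Decidable (Spec_get_slides arr out) := by unfold Spec_get_slides; infer_instance

-- ===== CLAIM (what is proved, stated in full; the proofs are below) =====
def Claim_equal_get_slides : Prop := ∀ (arr : List Int), Dom_get_slides arr → Spec_get_slides arr (get_slides arr)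

-- ===== LEMMAS AND PROOFS =====

-- proof-side reference list: longest strictly increasing run ending at each index
def upRunsAux : List Int → Option Int → Int → List Int
  | [], _, _ => []
  | x :: xs, prev, run =>
    let r := if (match prev with | some p => decide (p < x) | none => false) then run + 1 else 1
    r :: upRunsAux xs (some x) r

def upRuns (a : List Int) : List Int := upRunsAux a none 0

theorem upRunsAux_length (xs : List Int) (p : Option Int) (r : Int) :
    (upRunsAux xs p r).length = xs.length := by
  induction xs generalizing p r with
  | nil => rfl
  | cons x xs ih => simp [upRunsAux, ih]

theorem upRuns_length (a : List Int) : (upRuns a).length = a.length :=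
  upRunsAux_length a none 0

theorem upRunsAux_getD_zero (x : Int) (xs : List Int) (r : Int) :
    (upRunsAux (x :: xs) none r).getD 0 0 = 1 := by
  simp [upRunsAux]

theorem upRunsAux_rec (xs : List Int) (p : Option Int) (r : Int) (i : Nat)
    (hi : i + 1 < xs.length) :
    (upRunsAux xs p r).getD (i+1) 0 =
      if xs.getD i 0 < xs.getD (i+1) 0 then (upRunsAux xs p r).getD i 0 + 1 else 1 := by
  induction xs generalizing p r i with
  | nil => simp at hi
  | cons x xs ih =>
    cases i with
    | zero =>
      cases xs with
      | nil => simp at hi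
      | cons y ys => simp [upRunsAux]
    | succ j =>
      have hj : j + 1 < xs.length := by simpa using hi
      simpa [upRunsAux] using ih _ _ j hj

theorem upRuns_rec (a : List Int) (i : Nat) (hi : i + 1 < a.length) :
    (upRuns a).getD (i+1) 0 =
      if a.getD i 0 < a.getD (i+1) 0 then (upRuns a).getD i 0 + 1 else 1 :=
  upRunsAux_rec a none 0 i hi

theorem getD_set_self (l : List Int) (i : Nat) (v : Int) (h : i < l.length) :
    (l.set i v).getD i 0 = v := by
  simp [List.getD_eq_getElem?_getD, h]

theorem getD_set_ne (l : List Int) (i j : Nat) (v : Int) (h : i ≠ j) :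
    (l.set i v).getD j 0 = l.getD j 0 := by
  simp [List.getD_eq_getElem?_getD, h]

theorem eq_of_getD (l1 l2 : List Int) (hl : l1.length = l2.length)
    (h : ∀ j, j < l1.length → l1.getD j 0 = l2.getD j 0) : l1 = l2 := by
  apply List.ext_getElem hl
  intro i h1 h2
  have hh := h i h1
  simpa [List.getD_eq_getElem?_getD, List.getElem?_eq_getElem, h1, h2] using hh

theorem getD_reverse (l : List Int) (j : Nat) (h : j < l.length) :
    l.reverse.getD j 0 = l.getD (l.length - 1 - j) 0 := by
  have h2 : l.length - 1 - j < l.length := by omega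
  have h1 : j < l.reverse.length := by simpa using h
  rw [List.getD_eq_getElem?_getD, List.getD_eq_getElem?_getD,
      List.getElem?_eq_getElem h1, List.getElem?_eq_getElem h2]
  simp [List.getElem_reverse]

theorem getD_replicate_one (n j : Nat) (h : j < n) :
    (List.replicate n (1 : Int)).getD j 0 = 1 := by
  simp [List.getD_eq_getElem?_getD, h]

theorem initFold (l : List Int) (a b : List Int) :
    l.foldl (fun (st : List Int × List Int) _ => (st.1 ++ [1], st.2 ++ [1])) (a, b)
      = (a ++ List.replicate l.length 1, b ++ List.replicate l.length 1) := by
  induction l generalizing a b with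
  | nil => simp
  | cons x xs ih =>
    simp only [List.foldl_cons, ih, List.length_cons, List.replicate_succ]
    simp

theorem uref_head (arr : List Int) (h : arr ≠ []) : (upRuns arr).getD 0 0 = 1 := by
  cases arr with
  | nil => exact absurd rfl h
  | cons x xs => exact upRunsAux_getD_zero x xs 0

theorem dref_last (arr : List Int) (h : arr ≠ []) :
    ((upRuns arr.reverse).reverse).getD (arr.length - 1) 0 = 1 := by
  have hlen : (upRuns arr.reverse).length = arr.length := by
    simpa using upRuns_length arr.reverse
  have hpos : 0 < arr.length := List.length_pos_of_ne_nil h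
  have h1 : arr.length - 1 < (upRuns arr.reverse).length := by omega
  rw [getD_reverse _ _ h1, hlen]
  have hz : arr.length - 1 - (arr.length - 1) = 0 := by omega
  rw [hz]
  apply uref_head
  simpa using h

theorem dref_rec (arr : List Int) (j : Nat) (h : j + 1 < arr.length) :
    ((upRuns arr.reverse).reverse).getD j 0 =
      if arr.getD (j+1) 0 < arr.getD j 0
      then ((upRuns arr.reverse).reverse).getD (j+1) 0 + 1 else 1 := by
  have hlen : (upRuns arr.reverse).length = arr.length := by
    simpa using upRuns_length arr.reverse
  have hrev : arr.reverse.length = arr.length := by simp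
  set n := arr.length with hn
  set k := n - 2 - j with hk
  have hj : j < (upRuns arr.reverse).length := by omega
  have hj1 : j + 1 < (upRuns arr.reverse).length := by omega
  rw [getD_reverse _ _ hj, getD_reverse _ _ hj1, hlen]
  have e1 : n - 1 - j = k + 1 := by omega
  have e2 : n - 1 - (j + 1) = k := by omega
  rw [e1, e2]
  have hrec := upRuns_rec arr.reverse k (by omega)
  rw [hrec]
  have ek : arr.reverse.getD k 0 = arr.getD (j+1) 0 := by
    rw [getD_reverse _ _ (by omega)]
    congr 1
    omega
  have ek1 : arr.reverse.getD (k+1) 0 = arr.getD j 0 := by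
    rw [getD_reverse _ _ (by omega)]
    congr 1
    omega
  rw [ek, ek1]

theorem upLoop (arr : List Int) (k : Nat) :
    ∀ (m : Nat) (u : List Int), 1 ≤ m → m + k = arr.length →
    u.length = arr.length →
    (∀ j, j < m → u.getD j 0 = (upRuns arr).getD j 0) →
    (PySem.List.pyRange (m : Int) (arr.length : Int) 1).foldl
      (fun u i =>
        if PySem.List.pyGetD arr i 0 > PySem.List.pyGetD arr (i-1) 0 then
          u.set i.toNat (PySem.List.pyGetD u (i-1) 0 + 1)
        else
          u.set i.toNat 1) u = upRuns arr := by
  induction k with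
  | zero =>
    intro m u hm hmk hlen hagree
    rw [PySem.List.pyRange_one_eq_nil (by omega)]
    simp only [List.foldl_nil]
    exact eq_of_getD u (upRuns arr) (by rw [hlen, upRuns_length])
      (fun j hj => hagree j (by omega))
  | succ k ih =>
    intro m u hm hmk hlen hagree
    have hmlt : (m : Int) < (arr.length : Int) := by omega
    rw [PySem.List.pyRange_one_cons hmlt]
    simp only [List.foldl_cons]
    have hcast : (m : Int) - 1 = ((m - 1 : Nat) : Int) := by omega
    have hstep :
        (if PySem.List.pyGetD arr (m : Int) 0 > PySem.List.pyGetD arr ((m : Int)-1) 0 then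
          u.set (m : Int).toNat (PySem.List.pyGetD u ((m : Int)-1) 0 + 1)
        else
          u.set (m : Int).toNat 1)
        = (if arr.getD (m-1) 0 < arr.getD m 0 then u.set m (u.getD (m-1) 0 + 1)
           else u.set m 1) := by
      rw [hcast]
      simp [PySem.List.pyGetD_natCast, gt_iff_lt]
    rw [hstep]
    have hmlen : m < u.length := by omega
    have hurec := upRuns_rec arr (m-1) (by omega)
    have hm1 : m - 1 + 1 = m := by omega
    rw [hm1] at hurec
    have hcastm : ((m + 1 : Nat) : Int) = (m : Int) + 1 := by push_cast; ring
    have := ih (m+1)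
      (if arr.getD (m-1) 0 < arr.getD m 0 then u.set m (u.getD (m-1) 0 + 1) else u.set m 1)
      (by omega) (by omega)
      (by split <;> simp [hlen])
      (by
        intro j hj
        by_cases hjm : j = m
        · subst hjm
          rw [hurec]
          split
          · rw [getD_set_self u j _ hmlen, hagree (j-1) (by omega)]
          · rw [getD_set_self u j _ hmlen]
        · have hjm' : j < m := by omega
          split <;>
            rw [getD_set_ne u m j _ (by omega)] <;> exact hagree j hjm')
    rw [hcastm] at this
    exact this

theorem downLoop (arr : List Int) (t : Nat) :
    ∀ (d : List Int), t + 1 ≤ arr.length →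
    d.length = arr.length →
    (∀ j, t ≤ j → j < arr.length →
      d.getD j 0 = ((upRuns arr.reverse).reverse).getD j 0) →
    (PySem.List.pyRange ((t : Int) - 1) (-1) (-1)).foldl
      (fun d i =>
        if PySem.List.pyGetD arr i 0 > PySem.List.pyGetD arr (i+1) 0 then
          d.set i.toNat (PySem.List.pyGetD d (i+1) 0 + 1)
        else
          d.set i.toNat 1) d = (upRuns arr.reverse).reverse := by
  have hlen : ((upRuns arr.reverse).reverse).length = arr.length := by
    simpa using upRuns_length arr.reverse
  induction t with
  | zero =>
    intro d ht hdlen hagree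
    rw [show ((0 : Nat) : Int) - 1 = -1 by norm_num,
        PySem.List.pyRange_neg_one_eq_nil (by norm_num)]
    simp only [List.foldl_nil]
    exact eq_of_getD d _ (by rw [hdlen, hlen])
      (fun j hj => hagree j (by omega) (by omega))
  | succ s ih =>
    intro d ht hdlen hagree
    have hc : ((s + 1 : Nat) : Int) - 1 = (s : Int) := by push_cast; ring
    rw [hc, PySem.List.pyRange_neg_one_cons (by omega)]
    simp only [List.foldl_cons]
    have hcast : (s : Int) + 1 = ((s + 1 : Nat) : Int) := by push_cast; ring
    have hstep :
        (if PySem.List.pyGetD arr (s : Int) 0 > PySem.List.pyGetD arr ((s : Int)+1) 0 then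
          d.set (s : Int).toNat (PySem.List.pyGetD d ((s : Int)+1) 0 + 1)
        else
          d.set (s : Int).toNat 1)
        = (if arr.getD (s+1) 0 < arr.getD s 0 then d.set s (d.getD (s+1) 0 + 1)
           else d.set s 1) := by
      simp only [hcast, PySem.List.pyGetD_natCast, Int.toNat_natCast, gt_iff_lt]
    rw [hstep]
    have hslen : s < d.length := by omega
    have hdrec := dref_rec arr s (by omega)
    have := ih
      (if arr.getD (s+1) 0 < arr.getD s 0 then d.set s (d.getD (s+1) 0 + 1) else d.set s 1)
      (by omega)
      (by split <;> simp [hdlen])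
      (by
        intro j hj hjn
        by_cases hjs : j = s
        · subst hjs
          rw [hdrec]
          split
          · rw [getD_set_self d j _ hslen, hagree (j+1) (by omega) (by omega)]
          · rw [getD_set_self d j _ hslen]
        · have hjs' : s < j := by omega
          split <;>
            rw [getD_set_ne d s j _ (by omega)] <;> exact hagree j (by omega) hjn)
    exact this

-- ===== B-side lemmas =====

theorem takeRun_fst_le (b : Bool) (p : Int) (xs : List Int) :
    (takeRun b p xs).1 ≤ xs.length := by
  induction xs generalizing p with
  | nil => simp [takeRun]
  | cons x xs ih =>
    by_cases hc : (if b = true then p < x else x < p)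
    · simp only [takeRun, if_pos hc]
      simpa using ih x
    · simp [takeRun, if_neg hc]

theorem takeRun_snd_eq_drop (b : Bool) (p : Int) (xs : List Int) :
    (takeRun b p xs).2 = xs.drop (takeRun b p xs).1 := by
  induction xs generalizing p with
  | nil => simp [takeRun]
  | cons x xs ih =>
    by_cases hc : (if b = true then p < x else x < p)
    · simp only [takeRun, if_pos hc]
      simpa using ih x
    · simp [takeRun, if_neg hc]

theorem takeRun_run_false (p : Int) (xs : List Int) (i : Nat)
    (hi : i < (takeRun false p xs).1) :
    (p :: xs).getD (i+1) 0 < (p :: xs).getD i 0 := by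
  induction xs generalizing p i with
  | nil => simp [takeRun] at hi
  | cons x xs ih =>
    by_cases hxp : x < p
    · have hc : (if false = true then p < x else x < p) := by simpa using hxp
      simp only [takeRun, if_pos hc] at hi
      cases i with
      | zero => simpa using hxp
      | succ j =>
        have := ih x j (by simpa using hi)
        simpa using this
    · simp [takeRun, hxp] at hi

theorem takeRun_stop_false (p : Int) (xs : List Int)
    (hk : (takeRun false p xs).1 < xs.length) :
    ¬ ((p :: xs).getD ((takeRun false p xs).1 + 1) 0 <
       (p :: xs).getD (takeRun false p xs).1 0) := by
  induction xs generalizing p with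
  | nil => simp at hk
  | cons x xs ih =>
    by_cases hxp : x < p
    · have hc : (if false = true then p < x else x < p) := by simpa using hxp
      simp only [takeRun, if_pos hc] at hk ⊢
      have := ih x (by simpa using hk)
      simpa using this
    · simp [takeRun, hxp]

theorem upRunsAux_takeRun (xs : List Int) (p c : Int) :
    upRunsAux xs (some p) c =
      (List.range (takeRun true p xs).1).map (fun (i : Nat) => c + (i : Int) + 1)
        ++ upRuns (takeRun true p xs).2 := by
  induction xs generalizing p c with
  | nil => simp [takeRun, upRunsAux, upRuns]
  | cons x xs ih =>
    by_cases hpx : p < x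
    · have ht : takeRun true p (x :: xs) = ((takeRun true x xs).1 + 1, (takeRun true x xs).2) := by
        simp [takeRun, hpx]
      rw [ht]
      have hfun : ((fun (i : Nat) => c + (i : Int) + 1) ∘ Nat.succ)
          = fun i : Nat => (c + 1) + (i : Int) + 1 := by
        funext i
        simp only [Function.comp]
        push_cast
        ring
      rw [List.range_succ_eq_map, List.map_cons, List.map_map, hfun]
      have hih := ih x (c + 1)
      show upRunsAux (x :: xs) (some p) c = _
      simp only [upRunsAux, hpx, decide_true, if_pos]
      rw [hih]
      simp
    · have ht : takeRun true p (x :: xs) = (0, x :: xs) := by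
        simp [takeRun, hpx]
      rw [ht]
      simp [upRuns, upRunsAux, hpx]

theorem bup_aux (n : Nat) : ∀ (arr : List Int), arr.length ≤ n →
    (runLengths true arr).flatMap (fun L => (List.range L).map (fun (i : Nat) => (i : Int) + 1))
      = upRuns arr := by
  induction n with
  | zero =>
    intro arr h
    have : arr = [] := List.eq_nil_of_length_eq_zero (by omega)
    subst this
    simp [runLengths, upRuns, upRunsAux]
  | succ n ih =>
    intro arr h
    cases arr with
    | nil => simp [runLengths, upRuns, upRunsAux]
    | cons x xs =>
      rw [show runLengths true (x :: xs)
            = ((takeRun true x xs).1 + 1) :: runLengths true (takeRun true x xs).2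
          from by rw [runLengths]]
      rw [List.flatMap_cons]
      have hrest : (takeRun true x xs).2.length ≤ n := by
        have := takeRun_snd_length true x xs
        simp only [List.length_cons] at h
        omega
      rw [ih _ hrest]
      have hfun : ((fun (i : Nat) => (i : Int) + 1) ∘ Nat.succ)
          = fun i : Nat => 1 + (i : Int) + 1 := by
        funext i
        simp only [Function.comp]
        push_cast
        ring
      rw [List.range_succ_eq_map, List.map_cons, List.map_map, hfun]
      have hupr : upRuns (x :: xs) = 1 :: upRunsAux xs (some x) 1 := by
        simp [upRuns, upRunsAux]
      rw [hupr, upRunsAux_takeRun xs x 1]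
      simp

theorem bup_eq (arr : List Int) :
    (runLengths true arr).flatMap (fun L => (List.range L).map (fun (i : Nat) => (i : Int) + 1))
      = upRuns arr :=
  bup_aux arr.length arr le_rfl

-- proof-side name for B's down-slides expression
def bdown (arr : List Int) : List Int :=
  (runLengths false arr).flatMap (fun L => (List.range L).map (fun (i : Nat) => (L : Int) - (i : Int)))

theorem desc_getD (L j : Nat) (h : j < L) :
    ((List.range L).map (fun (i : Nat) => (L : Int) - (i : Int))).getD j 0 = (L : Int) - (j : Int) := by
  rw [List.getD_eq_getElem?_getD, List.getElem?_map, List.getElem?_range h]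
  simp

theorem sum_runLengths (b : Bool) : ∀ (n : Nat) (arr : List Int), arr.length ≤ n →
    (runLengths b arr).sum = arr.length := by
  intro n
  induction n with
  | zero =>
    intro arr h
    have : arr = [] := List.eq_nil_of_length_eq_zero (by omega)
    subst this
    simp [runLengths]
  | succ n ih =>
    intro arr h
    cases arr with
    | nil => simp [runLengths]
    | cons x xs =>
      rw [show runLengths b (x :: xs)
            = ((takeRun b x xs).1 + 1) :: runLengths b (takeRun b x xs).2
          from by rw [runLengths]]
      have hle := takeRun_snd_length b x xs
      simp only [List.length_cons] at h
      rw [List.sum_cons, ih _ (by omega)]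
      rw [takeRun_snd_eq_drop b x xs, List.length_drop]
      have := takeRun_fst_le b x xs
      simp only [List.length_cons]
      omega

theorem bdown_length (arr : List Int) : (bdown arr).length = arr.length := by
  unfold bdown
  rw [List.length_flatMap]
  have : ∀ L : Nat, ((List.range L).map (fun (i : Nat) => (L : Int) - (i : Int))).length = L := by
    intro L; simp
  calc ((runLengths false arr).map
          (fun L => ((List.range L).map (fun (i : Nat) => (L : Int) - (i : Int))).length)).sum
      = ((runLengths false arr).map id).sum := by
        congr 1
        exact List.map_congr_left (fun L _ => by simp)
    _ = arr.length := by
        rw [List.map_id]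
        exact sum_runLengths false arr.length arr le_rfl

-- the defining recurrence of down-slides, as a predicate on one cell
def Pd (arr l : List Int) (j : Nat) : Prop :=
  l.getD j 0 = if j + 1 < arr.length ∧ arr.getD (j+1) 0 < arr.getD j 0
               then l.getD (j+1) 0 + 1 else 1

theorem down_unique (arr l1 l2 : List Int)
    (h1 : l1.length = arr.length) (h2 : l2.length = arr.length)
    (p1 : ∀ j, j < arr.length → Pd arr l1 j) (p2 : ∀ j, j < arr.length → Pd arr l2 j) :
    l1 = l2 := by
  have key : ∀ k j, j < arr.length → arr.length ≤ j + 1 + k → l1.getD j 0 = l2.getD j 0 := by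
    intro k
    induction k with
    | zero =>
      intro j hj hle
      have c : ¬ (j + 1 < arr.length ∧ arr.getD (j+1) 0 < arr.getD j 0) := by
        intro ⟨h, _⟩; omega
      rw [p1 j hj, p2 j hj, if_neg c, if_neg c]
    | succ k ih =>
      intro j hj hle
      rw [p1 j hj, p2 j hj]
      by_cases c : j + 1 < arr.length ∧ arr.getD (j+1) 0 < arr.getD j 0
      · rw [if_pos c, if_pos c, ih (j+1) c.1 (by omega)]
      · rw [if_neg c, if_neg c]
  exact eq_of_getD l1 l2 (by omega)
    (fun j hj => key (arr.length - j) j (by omega) (by omega))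

theorem Pd_dref (arr : List Int) (j : Nat) (hj : j < arr.length) :
    Pd arr ((upRuns arr.reverse).reverse) j := by
  unfold Pd
  by_cases hje : j + 1 < arr.length
  · rw [dref_rec arr j hje]
    by_cases hc : arr.getD (j+1) 0 < arr.getD j 0
    · rw [if_pos hc, if_pos ⟨hje, hc⟩]
    · rw [if_neg hc, if_neg (by intro ⟨_, h⟩; exact hc h)]
  · have hjl : j = arr.length - 1 := by omega
    rw [if_neg (by intro ⟨h, _⟩; omega), hjl]
    exact dref_last arr (by intro h; subst h; simp at hj)

theorem getD_drop_int (xs : List Int) (k t : Nat) :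
    (xs.drop k).getD t 0 = xs.getD (k + t) 0 := by
  rw [List.getD_eq_getElem?_getD, List.getD_eq_getElem?_getD, List.getElem?_drop]

theorem bdown_cons (x : Int) (xs : List Int) :
    bdown (x :: xs) =
      ((List.range ((takeRun false x xs).1 + 1)).map
        (fun (i : Nat) => (((takeRun false x xs).1 + 1 : Nat) : Int) - (i : Int)))
      ++ bdown (takeRun false x xs).2 := by
  unfold bdown
  rw [show runLengths false (x :: xs)
        = ((takeRun false x xs).1 + 1) :: runLengths false (takeRun false x xs).2
      from by rw [runLengths]]
  rw [List.flatMap_cons]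

theorem Pd_bdown_aux (n : Nat) : ∀ (arr : List Int), arr.length ≤ n →
    ∀ j, j < arr.length → Pd arr (bdown arr) j := by
  induction n with
  | zero =>
    intro arr h j hj
    omega
  | succ n ih =>
    intro arr h j hj
    cases arr with
    | nil => simp at hj
    | cons x xs =>
      set k := (takeRun false x xs).1 with hkdef
      set rest := (takeRun false x xs).2 with hrdef
      have hkle : k ≤ xs.length := takeRun_fst_le false x xs
      have hrd : rest = xs.drop k := takeRun_snd_eq_drop false x xs
      have hrlen : rest.length = xs.length - k := by rw [hrd]; simp
      have hb : bdown (x :: xs) =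
          ((List.range (k + 1)).map (fun (i : Nat) => ((k + 1 : Nat) : Int) - (i : Int)))
          ++ bdown rest := bdown_cons x xs
      have hdesclen : ((List.range (k + 1)).map
          (fun (i : Nat) => ((k + 1 : Nat) : Int) - (i : Int))).length = k + 1 := by simp
      have hn : (x :: xs).length = xs.length + 1 := by simp
      have hblen : (bdown rest).length = rest.length := bdown_length rest
      simp only [hn] at hj
      unfold Pd
      by_cases hjk : j < k
      · -- inside the leading run, strictly before its last cell
        have g1 : (bdown (x :: xs)).getD j 0 = ((k + 1 : Nat) : Int) - (j : Nat) := by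
          rw [hb, List.getD_append _ _ _ _ (by omega)]
          exact desc_getD (k+1) j (by omega)
        have g2 : (bdown (x :: xs)).getD (j+1) 0 = ((k + 1 : Nat) : Int) - ((j+1 : Nat)) := by
          rw [hb, List.getD_append _ _ _ _ (by omega)]
          exact desc_getD (k+1) (j+1) (by omega)
        have hdec := takeRun_run_false x xs j (by omega)
        rw [g1, g2, if_pos ⟨by simp; omega, hdec⟩]
        push_cast
        ring
      · by_cases hjek : j = k
        · -- last cell of the leading run: value 1, recurrence condition fails
          rw [hjek]
          have g1 : (bdown (x :: xs)).getD k 0 = ((k + 1 : Nat) : Int) - (k : Nat) := by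
            rw [hb, List.getD_append _ _ _ _ (by omega)]
            exact desc_getD (k+1) k (by omega)
          rw [g1]
          have hval : ((k + 1 : Nat) : Int) - (k : Nat) = 1 := by push_cast; ring
          rw [hval]
          by_cases hje : k + 1 < (x :: xs).length
          · have hstop := takeRun_stop_false x xs (by simp at hje; omega)
            rw [if_neg (by intro ⟨_, hlt⟩; exact hstop hlt)]
          · rw [if_neg (by intro ⟨hh, _⟩; exact hje hh)]
        · -- inside the tail: translate to the inductive hypothesis on rest
          have hjgt : k < j := by omega
          set t := j - (k + 1) with htdef
          have hjt : j = k + 1 + t := by omega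
          have htlen : t < rest.length := by omega
          have harrj : (x :: xs).getD j 0 = rest.getD t 0 := by
            rw [hrd, getD_drop_int, hjt,
                show k + 1 + t = (k + t) + 1 from by omega, List.getD_cons_succ]
          have harrj1 : (x :: xs).getD (j+1) 0 = rest.getD (t+1) 0 := by
            rw [hrd, getD_drop_int, hjt,
                show k + 1 + t + 1 = (k + (t + 1)) + 1 from by omega, List.getD_cons_succ]
          have gbj : (bdown (x :: xs)).getD j 0 = (bdown rest).getD t 0 := by
            rw [hb, List.getD_append_right _ _ _ _ (by omega)]
            congr 1
            omega
          have gbj1 : (bdown (x :: xs)).getD (j+1) 0 = (bdown rest).getD (t+1) 0 := by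
            rw [hb, List.getD_append_right _ _ _ _ (by omega)]
            congr 1
            omega
          have hih := ih rest (by omega) t htlen
          unfold Pd at hih
          rw [gbj, gbj1, harrj, harrj1, hih]
          have hcond : (t + 1 < rest.length ∧ rest.getD (t+1) 0 < rest.getD t 0)
              ↔ (j + 1 < (x :: xs).length ∧ rest.getD (t+1) 0 < rest.getD t 0) := by
            constructor
            · intro ⟨h1, h2⟩; exact ⟨by simp; omega, h2⟩
            · intro ⟨h1, h2⟩; exact ⟨by simp at h1; omega, h2⟩
          by_cases hc : t + 1 < rest.length ∧ rest.getD (t+1) 0 < rest.getD t 0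
          · rw [if_pos hc, if_pos (hcond.mp hc)]
          · rw [if_neg hc, if_neg (fun h => hc (hcond.mpr h))]

theorem bdown_eq (arr : List Int) : bdown arr = (upRuns arr.reverse).reverse := by
  apply down_unique arr
  · exact bdown_length arr
  · simpa using upRuns_length arr.reverse
  · exact Pd_bdown_aux arr.length arr le_rfl
  · exact Pd_dref arr

theorem alt_eq (arr : List Int) :
    get_slides_alt arr = (upRuns arr, (upRuns arr.reverse).reverse) := by
  unfold get_slides_alt
  rw [Prod.mk.injEq]
  exact ⟨bup_eq arr, bdown_eq arr⟩

-- ===== VERDICT =====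
theorem get_slides_spec : Claim_equal_get_slides := by
  intro arr _
  unfold Spec_get_slides
  rw [alt_eq]
  cases arr with
  | nil => rfl
  | cons x xs =>
    set arr := x :: xs with harr
    have hpos : 0 < arr.length := by simp [harr]
    have hne : arr ≠ [] := by simp [harr]
    have hrlen : (PySem.List.pyRange 0 (arr.length : Int) 1).length = arr.length := by
      rw [PySem.List.length_pyRange_one]
      omega
    show get_slides arr = (upRuns arr, (upRuns arr.reverse).reverse)
    simp only [get_slides, initFold, List.nil_append, hrlen]
    rw [Prod.mk.injEq]
    constructor
    · have h := upLoop arr (arr.length - 1) 1 (List.replicate arr.length 1) le_rfl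
        (by omega) (by simp)
        (by
          intro j hj
          have hj0 : j = 0 := by omega
          subst hj0
          rw [getD_replicate_one _ _ hpos, uref_head arr hne])
      simpa using h
    · have h := downLoop arr (arr.length - 1) (List.replicate arr.length 1)
        (by omega) (by simp)
        (by
          intro j hj hjn
          have hj1 : j = arr.length - 1 := by omega
          subst hj1
          rw [getD_replicate_one _ _ (by omega), dref_last arr hne])
      have hc : ((arr.length - 1 : Nat) : Int) - 1 = (arr.length : Int) - 2 := by omega
      rw [hc] at h
      exact h
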